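-- pv_equiv track=rewrite | github.com/monocosmo/Udacity_Introduction_to_Computer_Science | Lesson2.5: Days between dates (my design).py | days_part1
-- ===== SOURCE A (Python) =====
-- def days_part1(year):
-- 	year_list = []
-- 	i = 1
-- 	while i < year :
-- 		year_list.append(i)
-- 		i = i + 1
-- 	days = 0
-- 	for e in year_list:
-- 		if e%400 == 0 or (e%4 == 0 and e%100 != 0):
-- 			days = days + 366
-- 		else:
-- 			days = days +365
-- 	return days
-- ===== SOURCE B (Python) =====
-- def days_part1(year):
--     n = max(year - 1, 0)
--     return 365 * n + n // 4 - n // 100 + n // 400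
-- ===== Notes on version B (the rewrite author's own statement) =====
-- stated objective: faster
-- what changed: Replaces the year-by-year list build and per-year leap test with a closed form: days per common year times the year count plus a leap-year count obtained by floor-division inclusion-exclusion.
import Mathlib
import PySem

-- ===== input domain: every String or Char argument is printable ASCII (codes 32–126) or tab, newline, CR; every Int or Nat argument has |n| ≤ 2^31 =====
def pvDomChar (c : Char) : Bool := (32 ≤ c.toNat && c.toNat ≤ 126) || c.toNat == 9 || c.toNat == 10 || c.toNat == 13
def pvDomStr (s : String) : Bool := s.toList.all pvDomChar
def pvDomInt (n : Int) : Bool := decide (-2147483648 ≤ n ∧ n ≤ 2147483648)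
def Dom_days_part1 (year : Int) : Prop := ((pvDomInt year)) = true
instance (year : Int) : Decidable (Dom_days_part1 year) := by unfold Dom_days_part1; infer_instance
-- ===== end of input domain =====

-- B replaces A's year-by-year loop with the closed-form 365*(year-1) + leap count by floor-division inclusion-exclusion (O(1) vs O(year)).


-- ===== PORT A =====
-- the while loop: year_list.append(i); i = i + 1 (appends accumulated in reverse, restored at the end)
def buildYears (year i : Int) (acc : List Int) : List Int :=
  if i < year then buildYears year (i + 1) (i :: acc) else acc.reverse
termination_by (year - i).toNat
decreasing_by omega

def days_part1 (year : Int) : Int :=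
  (buildYears year 1 []).foldl
    (fun days e =>
      if PySem.Int.mod e 400 = 0 ∨ (PySem.Int.mod e 4 = 0 ∧ PySem.Int.mod e 100 ≠ 0) then
        days + 366
      else
        days + 365)
    0

-- ===== PORT B =====
def days_part1_alt (year : Int) : Int :=
  let n := max (year - 1) 0
  365 * n + PySem.Int.floordiv n 4 - PySem.Int.floordiv n 100 + PySem.Int.floordiv n 400

-- ===== PRECONDITION & SPEC =====
def Spec_days_part1 (year : Int) (out : Int) : Prop := out = days_part1_alt year
instance (year : Int) (out : Int) : Decidable (Spec_days_part1 year out) := by unfold Spec_days_part1; infer_instance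

-- ===== CLAIM (what is proved, stated in full; the proofs are below) =====
def Claim_equal_days_part1 : Prop := ∀ (year : Int), Dom_days_part1 year → Spec_days_part1 year (days_part1 year)

-- ===== LEMMAS AND PROOFS =====
-- proof-side structural view of the while loop's list
def yearsFrom (year i : Int) : List Int :=
  if i < year then i :: yearsFrom year (i + 1) else []
termination_by (year - i).toNat
decreasing_by omega

theorem buildYears_eq (year : Int) : ∀ (i : Int) (acc : List Int),
    buildYears year i acc = acc.reverse ++ yearsFrom year i := by
  intro i
  induction i using yearsFrom.induct year with
  | case1 i hlt ih =>
    intro acc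
    rw [buildYears, yearsFrom, if_pos hlt, if_pos hlt, ih]
    simp
  | case2 i hlt =>
    intro acc
    rw [buildYears, yearsFrom, if_neg hlt, if_neg hlt]
    simp

-- days of complete years 1..n, closed form over ediv (proof-side shadow of B)
def G (n : Int) : Int := 365 * n + n / 4 - n / 100 + n / 400

def body (days e : Int) : Int :=
  if PySem.Int.mod e 400 = 0 ∨ (PySem.Int.mod e 4 = 0 ∧ PySem.Int.mod e 100 ≠ 0) then
    days + 366
  else
    days + 365

theorem body_eq (acc i : Int) : body acc i = acc + (G i - G (i - 1)) := by
  unfold body G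
  rw [PySem.Int.mod_eq_emod_of_pos (show (0:Int) < 400 by norm_num),
      PySem.Int.mod_eq_emod_of_pos (show (0:Int) < 4 by norm_num),
      PySem.Int.mod_eq_emod_of_pos (show (0:Int) < 100 by norm_num)]
  split_ifs with hc
  · rcases hc with h400 | ⟨h4, h100⟩ <;> omega
  · push Not at hc
    omega

theorem fold_build (k : Nat) : ∀ (year i acc : Int), 1 ≤ i → (year - i).toNat = k →
    (yearsFrom year i).foldl body acc = acc + G (max (year - 1) (i - 1)) - G (i - 1) := by
  induction k with
  | zero =>
    intro year i acc hi hk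
    rw [yearsFrom]
    have : ¬ i < year := by omega
    simp [this]
    have : max (year - 1) (i - 1) = i - 1 := by omega
    rw [this]; ring
  | succ n ih =>
    intro year i acc hi hk
    rw [yearsFrom]
    have hlt : i < year := by omega
    simp only [if_pos hlt, List.foldl_cons]
    rw [ih year (i + 1) (body acc i) (by omega) (by omega)]
    rw [body_eq acc i]
    have h1 : i + 1 - 1 = i := by ring
    have hm : max (year - 1) i = max (year - 1) (i - 1) := by omega
    rw [h1, hm]
    ring

theorem days_part1_eq_G (year : Int) : days_part1 year = G (max (year - 1) 0) := by
  have := fold_build (year - 1).toNat year 1 0 (by omega) (by omega)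
  unfold days_part1
  have hb : (fun days e =>
      if PySem.Int.mod e 400 = 0 ∨ (PySem.Int.mod e 4 = 0 ∧ PySem.Int.mod e 100 ≠ 0) then
        days + 366 else days + 365) = body := rfl
  rw [hb, buildYears_eq, List.reverse_nil, List.nil_append, this]
  norm_num [G]

-- ===== VERDICT (by name: the statement is the Claim_ definition above) =====
theorem days_part1_spec : Claim_equal_days_part1 := by
  intro year _
  unfold Spec_days_part1 days_part1_alt
  rw [days_part1_eq_G]
  show G (max (year - 1) 0) = 365 * max (year - 1) 0 + PySem.Int.floordiv (max (year - 1) 0) 4 - PySem.Int.floordiv (max (year - 1) 0) 100 + PySem.Int.floordiv (max (year - 1) 0) 400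
  rw [PySem.Int.floordiv_eq_ediv_of_pos (show (0:Int) < 4 by norm_num),
      PySem.Int.floordiv_eq_ediv_of_pos (show (0:Int) < 100 by norm_num),
      PySem.Int.floordiv_eq_ediv_of_pos (show (0:Int) < 400 by norm_num)]
  unfold G
  ring
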